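-- pv_equiv track=rewrite | github.com/WAF2p/pass | wafpass/fixer.py | _unquoted_hash
-- ===== SOURCE A (Python) =====
-- def _unquoted_hash(s: str) -> int:
--     """Return the index of the first '#' outside quotes, or -1."""
--     in_str = False
--     for i, ch in enumerate(s):
--         if ch == '"':
--             in_str = not in_str
--         elif ch == "#" and not in_str:
--             return i
--     return -1
-- ===== SOURCE B (Python) =====
-- def _unquoted_hash(s: str) -> int:
--     """Return the index of the first '#' outside quotes, or -1.
--
--     Stateless formulation: a '#' at index i is unquoted iff the number of
--     '"' characters before it is even."""
--     return next((i for i, ch in enumerate(s)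
--                  if ch == '#' and s.count('"', 0, i) % 2 == 0), -1)
-- ===== Notes on version B (the rewrite author's own statement) =====
-- stated objective: alternative
-- what changed: Replaces A's stateful quote-toggle scan with a stateless first-match search: a '#' at index i is the answer iff the count of '"' in s[:i] is even, written as one next()-over-generator expression.
import Mathlib
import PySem

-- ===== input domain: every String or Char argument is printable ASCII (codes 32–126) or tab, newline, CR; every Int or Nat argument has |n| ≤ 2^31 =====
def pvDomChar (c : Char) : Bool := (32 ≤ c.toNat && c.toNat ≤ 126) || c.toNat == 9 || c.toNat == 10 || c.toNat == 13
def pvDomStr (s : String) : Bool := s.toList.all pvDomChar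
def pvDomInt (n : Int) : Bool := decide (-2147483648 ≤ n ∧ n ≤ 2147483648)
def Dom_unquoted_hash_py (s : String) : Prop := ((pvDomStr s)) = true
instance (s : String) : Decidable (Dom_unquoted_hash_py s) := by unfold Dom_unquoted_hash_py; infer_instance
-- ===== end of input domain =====

-- B replaces A's stateful quote-toggle scan by a stateless first-match search
-- ('#' at i is unquoted iff s[:i] holds an even number of '"'); alternative decomposition, not faster.

-- ===== PORT A =====
-- A's for-loop over enumerate(s) with the in_str toggle, as structural recursion on the chars.
def pvALoop : List Char → Nat → Bool → Int
  | [], _, _ => -1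
  | ch :: rest, i, inStr =>
    if ch = '"' then pvALoop rest (i + 1) (!inStr)
    else if ch = '#' ∧ inStr = false then (i : Int)
    else pvALoop rest (i + 1) inStr

def unquoted_hash_py (s : String) : Int := pvALoop s.toList 0 false

-- ===== PORT B =====
-- Source B's generator over enumerate(s): first i with s[i] = '#' and s.count('"', 0, i) even.
def pvBScan (cs : List Char) : List (Int × Char) → Int
  | [] => -1
  | (i, ch) :: rest =>
    if ch = '#' ∧ PySem.Chars.count (PySem.List.slice cs (some 0) (some i)) ['"'] % 2 = 0
    then i else pvBScan cs rest

def unquoted_hash_py_alt (s : String) : Int :=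
  pvBScan s.toList (PySem.List.enumerate s.toList)

-- ===== PRECONDITION & SPEC =====
def Spec_unquoted_hash_py (s : String) (out : Int) : Prop := out = unquoted_hash_py_alt s
instance (s : String) (out : Int) : Decidable (Spec_unquoted_hash_py s out) := by unfold Spec_unquoted_hash_py; infer_instance

-- ===== CLAIM (what is proved, stated in full; the proofs are below) =====
def Claim_equal_unquoted_hash_py : Prop := ∀ (s : String), Dom_unquoted_hash_py s → Spec_unquoted_hash_py s (unquoted_hash_py s)

-- ===== LEMMAS AND PROOFS =====

-- Python's s.count(sub) for a single-character sub is List.count (fuel-generalized form).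
theorem pv_countgo (c : Char) (l : List Char) (fuel acc : Nat) (h : l.length ≤ fuel) :
    PySem.Chars.count.go [c] fuel l acc = acc + l.count c := by
  induction l generalizing fuel acc with
  | nil => cases fuel <;> simp [PySem.Chars.count.go]
  | cons x t ih =>
    cases fuel with
    | zero => simp at h
    | succ f =>
      have hf : t.length ≤ f := by simp at h; omega
      rw [PySem.Chars.count.go]
      by_cases hx : c = x
      · subst hx
        simp only [List.isPrefixOf, beq_self_eq_true, Bool.and_eq_true, and_self, if_true,
          List.length_singleton, List.drop_succ_cons, List.drop_zero]
        rw [ih f (acc + 1) hf]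
        simp
        omega
      · have hx' : ¬ x = c := fun h' => hx h'.symm
        simp only [List.isPrefixOf]
        rw [if_neg (by simp [hx])]
        rw [ih f acc hf]
        simp [hx']

theorem pv_count_single (c : Char) (l : List Char) :
    PySem.Chars.count l [c] = l.count c := by
  simp [PySem.Chars.count, pv_countgo c l l.length 0 le_rfl]

-- Core invariant: A's in_str flag is the parity of '"' in the consumed prefix.
theorem pv_key (cs : List Char) (suf : List Char) (i : Nat)
    (hpre : cs.take i ++ suf = cs) :
    pvALoop suf i (decide ((cs.take i).count '"' % 2 = 1)) =
      pvBScan cs (PySem.List.enumerate suf (i : Int)) := by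
  induction suf generalizing i with
  | nil => simp [pvALoop, pvBScan, PySem.List.enumerate]
  | cons ch rest ih =>
    have hlt : i < cs.length := by
      have h1 := congrArg List.length hpre
      simp [List.length_take] at h1
      omega
    have hlen_take : (cs.take i).length = i := by
      simp [List.length_take]; omega
    have hdrop : cs.drop i = ch :: rest := by
      rw [← hpre]; exact List.drop_left' hlen_take
    have htake : cs.take (i + 1) = cs.take i ++ [ch] := by
      rw [List.take_add, hdrop]
      simp
    have hpre' : cs.take (i + 1) ++ rest = cs := by
      rw [htake, List.append_assoc]
      simpa using hpre
    have hslice : PySem.List.slice cs (some (0 : Int)) (some ((i : Nat) : Int)) = cs.take i := by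
      have := PySem.List.slice_natCast cs 0 i
      simpa using this
    have hcount1 : (cs.take (i + 1)).count '"' =
        (cs.take i).count '"' + if ch = '"' then 1 else 0 := by
      rw [htake]
      simp [List.count_append]
      split_ifs with h <;> simp [h]
    rw [PySem.List.enumerate]
    rw [show pvBScan cs (((i : Int), ch) :: PySem.List.enumerate rest ((i : Int) + 1)) =
        (if ch = '#' ∧ PySem.Chars.count (PySem.List.slice cs (some 0) (some (i : Int))) ['"'] % 2 = 0
         then (i : Int) else pvBScan cs (PySem.List.enumerate rest ((i : Int) + 1))) from rfl]
    rw [hslice, pv_count_single]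
    rw [pvALoop]
    by_cases hq : ch = '"'
    · have hnh : ¬ (ch = '#' ∧ ((cs.take i).count '"') % 2 = 0) := by
        intro hc; rw [hq] at hc; exact absurd hc.1 (by decide)
      rw [if_pos hq, if_neg hnh]
      have := ih (i + 1) hpre'
      rw [hcount1, hq] at this
      rw [show ((i : Nat) : Int) + 1 = (((i + 1 : Nat)) : Int) by push_cast; ring] at *
      rcases Nat.mod_two_eq_zero_or_one ((cs.take i).count '"') with h | h <;>
        · rw [show (!decide ((cs.take i).count '"' % 2 = 1)) =
              decide (((cs.take i).count '"' + if ('"' : Char) = '"' then 1 else 0) % 2 = 1) by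
            simp [h, Nat.add_mod]]
          exact this
    · rw [if_neg hq]
      by_cases hh : ch = '#'
      · rcases Nat.mod_two_eq_zero_or_one ((cs.take i).count '"') with h | h
        · rw [if_pos (show ch = '#' ∧ decide ((cs.take i).count '"' % 2 = 1) = false from ⟨hh, by simp [h]⟩),
              if_pos ⟨hh, h⟩]
        · rw [if_neg (by simp [h]), if_neg (by omega)]
          have := ih (i + 1) hpre'
          rw [hcount1, if_neg hq] at this
          rw [show ((i : Nat) : Int) + 1 = (((i + 1 : Nat)) : Int) by push_cast; ring]
          simpa [h] using this
      · rw [if_neg (fun hc => hh hc.1), if_neg (fun hc => hh hc.1)]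
        have := ih (i + 1) hpre'
        rw [hcount1, if_neg hq] at this
        rw [show ((i : Nat) : Int) + 1 = (((i + 1 : Nat)) : Int) by push_cast; ring]
        simpa using this

-- ===== VERDICT (by name: the statement is the Claim_ definition above) =====
theorem unquoted_hash_py_spec : Claim_equal_unquoted_hash_py := by
  intro s _
  unfold Spec_unquoted_hash_py unquoted_hash_py unquoted_hash_py_alt
  have := pv_key s.toList s.toList 0 (by simp)
  simpa using this
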